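-- pv_equiv track=rewrite | github.com/vigneshsabapathi/python-algorithms | hashes/hamming_code.py | receptor_converter
-- ===== SOURCE A (Python) =====
-- import math
--
-- def receptor_converter(size_par: int, data: str) -> tuple[list[str], bool]:
--     """
--     Decode a Hamming-encoded message and check integrity.
--
--     :param size_par: number of parity bits
--     :param data: received message as string
--     :return: tuple of (data bits, integrity check passed)
--
--     >>> receptor_converter(4, "1111010010111111")
--     (['1', '0', '1', '0', '1', '0', '1', '1', '1', '1', '1', '1'], True)
--     """
--     data_out_gab = []
--     qtd_bp = 0
--     parity_received = []
--     data_output = []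
--
--     for i, item in enumerate(data, 1):
--         if qtd_bp < size_par and math.log2(i).is_integer():
--             data_out_gab.append("P")
--             qtd_bp += 1
--         else:
--             data_out_gab.append("D")
--
--         if data_out_gab[-1] == "D":
--             data_output.append(item)
--         else:
--             parity_received.append(item)
--
--     # Recalculate parity
--     parity = []
--     bin_pos = [bin(x)[2:] for x in range(1, size_par + len(data_output) + 1)]
--
--     data_ord = []
--     data_out_gab2 = []
--     qtd_bp = 0
--     cont_data = 0
--
--     for x in range(1, size_par + len(data_output) + 1):
--         if qtd_bp < size_par and math.log2(x).is_integer():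
--             data_out_gab2.append("P")
--             qtd_bp += 1
--         else:
--             data_out_gab2.append("D")
--
--         if data_out_gab2[-1] == "D":
--             data_ord.append(data_output[cont_data])
--             cont_data += 1
--         else:
--             data_ord.append(None)
--
--     for bp in range(1, size_par + 1):
--         cont_bo = 0
--         for cont_loop, x in enumerate(data_ord):
--             if x is not None:
--                 try:
--                     aux = bin_pos[cont_loop][-bp]
--                 except IndexError:
--                     aux = "0"
--                 if aux == "1" and x == "1":
--                     cont_bo += 1
--         parity.append(str(cont_bo % 2))
--
--     ack = parity_received == parity
--     return data_output, ack
-- ===== SOURCE B (Python) =====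
-- def receptor_converter(size_par: int, data: str) -> tuple[list[str], bool]:
--     parity_received = []
--     data_output = []
--     qtd = 0
--     for i, ch in enumerate(data, 1):
--         if qtd < size_par and (i & (i - 1)) == 0:
--             parity_received.append(ch)
--             qtd += 1
--         else:
--             data_output.append(ch)
--
--     n = size_par + len(data_output)
--     acc = [0] * max(size_par, 0)
--     qtd = 0
--     cont = 0
--     for pos in range(1, n + 1):
--         if qtd < size_par and (pos & (pos - 1)) == 0:
--             qtd += 1
--         else:
--             if data_output[cont] == "1":
--                 acc = [a + ((pos >> b) & 1) for b, a in enumerate(acc)]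
--             cont += 1
--
--     parity = [str(a % 2) for a in acc]
--     return data_output, parity_received == parity
-- ===== Notes on version B (the rewrite author's own statement) =====
-- stated objective: simpler
-- what changed: B drops A's data_ord list of None placeholders and its list of binary strings with try/except indexing: it re-walks the Hamming positions once, adding each '1' data bit's position bits into an integer parity accumulator per parity bit via shift-and-mask, then compares.
import Mathlib
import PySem

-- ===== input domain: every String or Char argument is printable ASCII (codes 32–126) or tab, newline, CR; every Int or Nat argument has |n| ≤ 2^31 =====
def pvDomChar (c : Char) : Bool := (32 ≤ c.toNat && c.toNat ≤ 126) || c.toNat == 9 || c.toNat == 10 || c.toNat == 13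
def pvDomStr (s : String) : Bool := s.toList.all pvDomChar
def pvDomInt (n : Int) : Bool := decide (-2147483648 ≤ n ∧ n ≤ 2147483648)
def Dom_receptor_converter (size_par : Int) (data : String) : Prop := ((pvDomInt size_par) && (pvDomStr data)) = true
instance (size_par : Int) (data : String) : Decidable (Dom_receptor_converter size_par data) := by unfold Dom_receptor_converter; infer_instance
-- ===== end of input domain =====

-- B replaces A's data_ord of None placeholders and list of binary strings by one sweep that adds
-- each '1' data bit's position mask into an integer parity accumulator (objective: simpler).

-- ===== PORT A =====

-- math.log2(i).is_integer(): exact for i ≥ 1 (the only arguments A evaluates it at)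
def pyLog2Int (i : Int) : Bool := decide (1 ≤ i) && (i.toNat &&& (i.toNat - 1) == 0)

-- bin(x)[2:]: exact for x ≥ 1 (the only arguments A evaluates it at)
def binDigits : Nat → List Char
  | 0 => []
  | (n+1) => binDigits ((n+1)/2) ++ [if (n+1) % 2 == 1 then '1' else '0']

-- first loop of A: state (i, data_out_gab, qtd_bp, parity_received, data_output)
def rcA1 (sp : Int) : List Char → Int → List String → Int → List String → List String → List String × List String
  | [], _, _, _, par, dat => (par, dat)
  | c :: cs, i, gab, qtd, par, dat =>
    let gab' := if qtd < sp ∧ pyLog2Int i then gab ++ ["P"] else gab ++ ["D"]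
    let qtd' := if qtd < sp ∧ pyLog2Int i then qtd + 1 else qtd
    if (PySem.List.pyGet? gab' (-1)).getD "" == "D" then
      rcA1 sp cs (i + 1) gab' qtd' par (dat ++ [String.singleton c])
    else
      rcA1 sp cs (i + 1) gab' qtd' (par ++ [String.singleton c]) dat

-- second loop of A building data_ord: state (data_out_gab2, qtd_bp, cont_data, data_ord)
-- data_output[cont_data] would raise IndexError exactly outside Pre_; ported with default ""
def rcA2 (sp : Int) (dat : List String) : List Int → List String → Int → Int → List (Option String) → List (Option String)
  | [], _, _, _, ord => ord
  | x :: xs, gab2, qtd, cont, ord =>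
    let gab2' := if qtd < sp ∧ pyLog2Int x then gab2 ++ ["P"] else gab2 ++ ["D"]
    let qtd' := if qtd < sp ∧ pyLog2Int x then qtd + 1 else qtd
    if (PySem.List.pyGet? gab2' (-1)).getD "" == "D" then
      rcA2 sp dat xs gab2' qtd' (cont + 1) (ord ++ [some (PySem.List.pyGetD dat cont "")])
    else
      rcA2 sp dat xs gab2' qtd' cont (ord ++ [none])

-- inner loop of A's parity recomputation for one bp (try/except IndexError gives aux = '0')
def rcA3 (bin_pos : List String) (data_ord : List (Option String)) (bp : Int) : Int :=
  (PySem.List.enumerate data_ord 0).foldl (fun cont_bo p =>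
    match p.2 with
    | none => cont_bo
    | some x =>
      let aux := ((PySem.List.pyGet? bin_pos p.1).bind (fun s => PySem.Str.pyGet? s (-bp))).getD '0'
      if aux == '1' ∧ x == "1" then cont_bo + 1 else cont_bo) 0

def receptor_converter (size_par : Int) (data : String) : List String × Bool :=
  let pd := rcA1 size_par data.toList 1 [] 0 [] []
  let parity_received := pd.1
  let data_output := pd.2
  let bin_pos := (PySem.List.pyRange 1 (size_par + data_output.length + 1) 1).map
      (fun x => String.ofList (binDigits x.toNat))
  let data_ord := rcA2 size_par data_output (PySem.List.pyRange 1 (size_par + data_output.length + 1) 1) [] 0 0 []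
  let parity := (PySem.List.pyRange 1 (size_par + 1) 1).foldl
      (fun par bp => par ++ [PySem.Int.toStr (PySem.Int.mod (rcA3 bin_pos data_ord bp) 2)]) []
  (data_output, decide (parity_received = parity))

-- ===== PORT B =====

-- (i & (i - 1)) == 0: B only evaluates it at i ≥ 1
def isPow2B (i : Int) : Bool := i.toNat &&& (i.toNat - 1) == 0

-- B's first loop: state (i, qtd, parity_received, data_output)
def rcB1 (sp : Int) : List Char → Int → Int → List String → List String → List String × List String
  | [], _, _, par, dat => (par, dat)
  | c :: cs, i, qtd, par, dat =>
    if qtd < sp ∧ isPow2B i then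
      rcB1 sp cs (i + 1) (qtd + 1) (par ++ [String.singleton c]) dat
    else
      rcB1 sp cs (i + 1) qtd par (dat ++ [String.singleton c])

-- B's accumulator sweep: state (qtd, cont, acc)
-- data_output[cont] would raise IndexError exactly outside Pre_; ported with default ""
def rcB2 (sp : Int) (dat : List String) : List Int → Int → Int → List Int → List Int
  | [], _, _, acc => acc
  | pos :: xs, qtd, cont, acc =>
    if qtd < sp ∧ isPow2B pos then
      rcB2 sp dat xs (qtd + 1) cont acc
    else
      let acc' := if PySem.List.pyGetD dat cont "" == "1"
        then acc.mapIdx (fun b a => a + PySem.Int.band (pos >>> b) 1) else acc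
      rcB2 sp dat xs qtd (cont + 1) acc'

def receptor_converter_alt (size_par : Int) (data : String) : List String × Bool :=
  let pd := rcB1 size_par data.toList 1 0 [] []
  let parity_received := pd.1
  let data_output := pd.2
  let acc := rcB2 size_par data_output (PySem.List.pyRange 1 (size_par + data_output.length + 1) 1) 0 0
      (List.replicate (max size_par 0).toNat 0)
  let parity := acc.map (fun a => PySem.Int.toStr (PySem.Int.mod a 2))
  (data_output, decide (parity_received = parity))

-- ===== PRECONDITION & SPEC =====

-- number of powers of two in 1..n (= n.bit_length() for n ≥ 1)
def pow2Count (n : Int) : Int := if 1 ≤ n then (PySem.Int.bitLength n : Int) else 0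

-- Pre_ excludes exactly the inputs where A raises IndexError (data_output[cont_data] past the end,
-- reached iff size_par exceeds the number of power-of-two positions among 1..size_par+#data bits); B raises there too.
def Pre_receptor_converter (size_par : Int) (data : String) : Prop :=
  size_par ≤ pow2Count (size_par + ((data.length : Int) - min (max size_par 0) (pow2Count (data.length : Int))))
instance (size_par : Int) (data : String) : Decidable (Pre_receptor_converter size_par data) := by
  unfold Pre_receptor_converter; infer_instance

def pvWitness_receptor_converter : Int × String := (4, "1111010010111111")

def Spec_receptor_converter (size_par : Int) (data : String) (out : List String × Bool) : Prop := out = receptor_converter_alt size_par data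
instance (size_par : Int) (data : String) (out : List String × Bool) : Decidable (Spec_receptor_converter size_par data out) := by unfold Spec_receptor_converter; infer_instance

-- ===== CLAIM (what is proved, stated in full; the proofs are below) =====
def Claim_equal_receptor_converter : Prop := ∀ (size_par : Int) (data : String), Dom_receptor_converter size_par data → Pre_receptor_converter size_par data → Spec_receptor_converter size_par data (receptor_converter size_par data)

-- ===== LEMMAS AND PROOFS =====

-- the two power-of-two tests agree on positive arguments
theorem log2_eq_pow2B (i : Int) (h : 1 ≤ i) : pyLog2Int i = isPow2B i := by
  simp [pyLog2Int, isPow2B, h]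

-- PASS 1: A's first loop equals B's first loop
theorem pass1_eq (sp : Int) : ∀ (cs : List Char) (i : Int) (gab : List String) (qtd : Int)
    (par dat : List String), 1 ≤ i →
    rcA1 sp cs i gab qtd par dat = rcB1 sp cs i qtd par dat := by
  intro cs
  induction cs with
  | nil => intro i gab qtd par dat hi; rfl
  | cons c cs ih =>
    intro i gab qtd par dat hi
    by_cases h : qtd < sp ∧ isPow2B i = true
    · simp only [rcA1, rcB1, log2_eq_pow2B i hi, if_pos h,
        PySem.List.pyGet?_neg_one_append_singleton, Option.getD_some]
      norm_num
      exact ih (i + 1) _ _ _ _ (by omega)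
    · simp only [rcA1, rcB1, log2_eq_pow2B i hi, if_neg h,
        PySem.List.pyGet?_neg_one_append_singleton, Option.getD_some]
      norm_num
      exact ih (i + 1) _ _ _ _ (by omega)

-- shared skeleton of both second loops: for each position, none (parity slot) or the fetched data bit
def slotsF (sp : Int) (dat : List String) : List Int → Int → Int → List (Int × Option String)
  | [], _, _ => []
  | pos :: xs, qtd, cont =>
    if qtd < sp ∧ pyLog2Int pos then (pos, none) :: slotsF sp dat xs (qtd + 1) cont
    else (pos, some (PySem.List.pyGetD dat cont "")) :: slotsF sp dat xs qtd (cont + 1)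

def foldSlots : List (Int × Option String) → List Int → List Int
  | [], acc => acc
  | (pos, x) :: rest, acc =>
    foldSlots rest (if x = some "1" then acc.mapIdx (fun b a => a + PySem.Int.band (pos >>> b) 1) else acc)

def cntSlots (b : Nat) (sl : List (Int × Option String)) : Int :=
  (sl.map (fun (p : Int × Option String) => if p.2 = some "1" then PySem.Int.band (p.1 >>> b) 1 else (0 : Int))).sum

theorem rcA2_eq_slots (sp : Int) (dat : List String) : ∀ (xs : List Int) (gab2 : List String)
    (qtd cont : Int) (ord : List (Option String)),
    rcA2 sp dat xs gab2 qtd cont ord = ord ++ (slotsF sp dat xs qtd cont).map Prod.snd := by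
  intro xs
  induction xs with
  | nil => intro gab2 qtd cont ord; simp [rcA2, slotsF]
  | cons x xs ih =>
    intro gab2 qtd cont ord
    by_cases h : qtd < sp ∧ pyLog2Int x = true
    · simp only [rcA2, slotsF, if_pos h, PySem.List.pyGet?_neg_one_append_singleton,
        Option.getD_some]
      norm_num
      rw [if_neg (show ¬("P" : String) = "D" by decide), ih]
      simp
    · simp only [rcA2, slotsF, if_neg h, PySem.List.pyGet?_neg_one_append_singleton,
        Option.getD_some]
      norm_num
      rw [ih]
      simp

theorem rcB2_eq_foldSlots (sp : Int) (dat : List String) : ∀ (xs : List Int) (qtd cont : Int)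
    (acc : List Int), (∀ p ∈ xs, 1 ≤ p) →
    rcB2 sp dat xs qtd cont acc = foldSlots (slotsF sp dat xs qtd cont) acc := by
  intro xs
  induction xs with
  | nil => intro qtd cont acc hpos; rfl
  | cons x xs ih =>
    intro qtd cont acc hpos
    have hx : 1 ≤ x := hpos x List.mem_cons_self
    have hrest : ∀ p ∈ xs, 1 ≤ p := fun p hp => hpos p (List.mem_cons_of_mem _ hp)
    by_cases h : qtd < sp ∧ pyLog2Int x = true
    · rw [log2_eq_pow2B x hx] at h
      simp only [rcB2, slotsF, foldSlots, log2_eq_pow2B x hx, if_pos h]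
      exact ih _ _ _ hrest
    · rw [log2_eq_pow2B x hx] at h
      simp only [rcB2, slotsF, foldSlots, log2_eq_pow2B x hx, if_neg h]
      by_cases hv : PySem.List.pyGetD dat cont "" = "1"
      · simp only [hv, beq_self_eq_true, if_true]
        exact ih _ _ _ hrest
      · rw [if_neg (by simpa using hv), if_neg (by simpa using hv)]
        exact ih _ _ _ hrest

theorem foldSlots_length : ∀ (sl : List (Int × Option String)) (acc : List Int),
    (foldSlots sl acc).length = acc.length := by
  intro sl
  induction sl with
  | nil => intro acc; rfl
  | cons p rest ih =>
    obtain ⟨pos, x⟩ := p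
    intro acc
    simp only [foldSlots]
    rw [ih]
    split <;> simp

theorem foldSlots_getD : ∀ (sl : List (Int × Option String)) (acc : List Int) (b : Nat)
    (hb : b < acc.length),
    (foldSlots sl acc).getD b 0 = acc.getD b 0 + cntSlots b sl := by
  intro sl
  induction sl with
  | nil => intro acc b _; simp [foldSlots, cntSlots]
  | cons p rest ih =>
    obtain ⟨pos, x⟩ := p
    intro acc b hb
    simp only [foldSlots]
    by_cases hx : x = some "1"
    · rw [if_pos hx, ih _ b (by simpa using hb)]
      rw [List.getD_eq_getElem _ _ (by simpa using hb), List.getElem_mapIdx,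
        List.getD_eq_getElem _ _ hb]
      simp [cntSlots, hx, add_assoc]
    · rw [if_neg hx, ih _ b hb]
      simp [cntSlots, hx]

theorem pyGet?_neg_getD {α : Type} (l : List α) (k : Nat) (hk : 1 ≤ k) (d : α) :
    (PySem.List.pyGet? l (-(k : Int))).getD d = l.reverse.getD (k - 1) d := by
  by_cases hlen : k ≤ l.length
  · rw [PySem.List.pyGet?_neg_natCast l k (by omega) hlen, List.getD_eq_getElem?_getD,
      List.getElem?_reverse (by omega)]
    congr 2
    omega
  · rw [(PySem.List.pyGet?_eq_none_iff _ _).mpr, Option.getD_none,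
      List.getD_eq_default _ _ (by simp; omega)]
    simp [PySem.Raise.InRange]
    omega

-- the k-th binary digit from the end is the k-th bit
theorem binDigits_rev_getD : ∀ (m k : Nat),
    (binDigits m).reverse.getD k '0' = (if m.testBit k then '1' else '0') := by
  intro m
  induction m using Nat.strong_induction_on with
  | _ m ih =>
    intro k
    match m with
    | 0 => simp [binDigits]
    | (n + 1) =>
      rw [binDigits]
      match k with
      | 0 =>
        rcases Nat.even_or_odd (n + 1) with he | ho
        · have h2 : (n + 1) % 2 = 0 := Nat.even_iff.mp he
          simp [h2, Nat.testBit_zero]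
        · have h2 : (n + 1) % 2 = 1 := Nat.odd_iff.mp ho
          simp [h2, Nat.testBit_zero]
      | (k + 1) =>
        have hlt : (n + 1) / 2 < n + 1 := Nat.div_lt_self (Nat.succ_pos n) (by norm_num)
        simp only [List.reverse_append, List.reverse_singleton, List.singleton_append,
          List.getD_cons_succ]
        rw [ih _ hlt k, Nat.testBit_succ]

-- A's aux test equals B's bit mask
theorem aux_eq_bit (m : Nat) (bp : Int) (h : 1 ≤ bp) :
    (((PySem.Str.pyGet? (String.ofList (binDigits m)) (-bp)).getD '0') == '1')
      = (PySem.Int.band ((m : Int) >>> (bp - 1).toNat) 1 == 1) := by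
  have h1 : PySem.Str.pyGet? (String.ofList (binDigits m)) (-bp) = PySem.List.pyGet? (binDigits m) (-bp) := by
    simp [PySem.Str.pyGet?_eq]
  have hbp' : -bp = -((bp.toNat : Nat) : Int) := by omega
  have hj : (bp - 1).toNat = bp.toNat - 1 := by omega
  rw [h1, hbp', pyGet?_neg_getD _ _ (by omega), binDigits_rev_getD, hj,
    ← Int.natCast_shiftRight, show (1 : Int) = ((1 : Nat) : Int) from rfl,
    PySem.Int.band_natCast, Nat.and_one_is_mod]
  rcases Nat.mod_two_eq_zero_or_one (m >>> (bp.toNat - 1)) with h2 | h2 <;>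
    simp [Nat.testBit, Nat.one_and_eq_mod_two, h2]

-- A's inner count over data_ord equals the slot count
theorem rcA3_eq_cnt (n : Int) (binp : List String)
    (hbin : binp = (PySem.List.pyRange 1 (n + 1) 1).map (fun x => String.ofList (binDigits x.toNat)))
    (bp : Int) (hbp : 1 ≤ bp) :
    ∀ (sl : List (Int × Option String)) (s : Int) (c0 : Int), 0 ≤ s →
    (sl.map Prod.fst = PySem.List.pyRange (s + 1) (n + 1) 1) →
    ((PySem.List.enumerate (sl.map Prod.snd) s).foldl (fun cont_bo p =>
      match p.2 with
      | none => cont_bo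
      | some x =>
        let aux := ((PySem.List.pyGet? binp p.1).bind (fun s => PySem.Str.pyGet? s (-bp))).getD '0'
        if aux == '1' ∧ x == "1" then cont_bo + 1 else cont_bo) c0)
      = c0 + cntSlots (bp - 1).toNat sl := by
  intro sl
  induction sl with
  | nil => intro s c0 hs hfst; simp [cntSlots]
  | cons p rest ih =>
    obtain ⟨pos, x⟩ := p
    intro s c0 hs hfst
    simp only [List.map_cons] at hfst
    have hlt : s + 1 < n + 1 := by
      by_contra hc
      rw [PySem.List.pyRange_one_eq_nil (by omega)] at hfst
      simp at hfst
    rw [PySem.List.pyRange_one_cons (by omega)] at hfst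
    have hpos : pos = s + 1 := by injection hfst
    have hrest : rest.map Prod.fst = PySem.List.pyRange (s + 1 + 1) (n + 1) 1 := by
      injection hfst
    simp only [List.map_cons, PySem.List.enumerate_cons, List.foldl_cons]
    cases x with
    | none =>
      rw [ih (s + 1) c0 (by omega) hrest]
      simp [cntSlots]
    | some v =>
      have hget : PySem.List.pyGet? binp s
          = some (String.ofList (binDigits (1 + ((s.toNat : Nat) : Int)).toNat)) := by
        rw [hbin, PySem.List.pyGet?_of_nonneg _ hs, List.getElem?_map,
          PySem.List.getElem?_pyRange_one, if_pos (by omega)]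
        rfl
      have hmc : (((1 + ((s.toNat : Nat) : Int)).toNat : Nat) : Int) = pos := by omega
      have haux := aux_eq_bit (1 + ((s.toNat : Nat) : Int)).toNat bp hbp
      rw [hmc] at haux
      have hbandeq : PySem.Int.band (pos >>> (bp - 1).toNat) 1
          = ((((1 + ((s.toNat : Nat) : Int)).toNat >>> (bp - 1).toNat) &&& 1 : Nat) : Int) := by
        rw [← hmc, ← Int.natCast_shiftRight, show (1 : Int) = ((1 : Nat) : Int) from rfl,
          PySem.Int.band_natCast]
      have hb01 : PySem.Int.band (pos >>> (bp - 1).toNat) 1 = 0 ∨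
          PySem.Int.band (pos >>> (bp - 1).toNat) 1 = 1 := by
        rw [hbandeq, Nat.and_one_is_mod]
        rcases Nat.mod_two_eq_zero_or_one ((1 + ((s.toNat : Nat) : Int)).toNat >>> (bp - 1).toNat)
          with h2 | h2 <;> rw [h2] <;> simp
      simp only [hget, Option.bind_some, haux]
      rw [ih (s + 1) _ (by omega) hrest]
      by_cases hv : v = "1"
      · subst hv
        rcases hb01 with hb | hb <;>
          · rw [show (bp - 1).toNat = bp.toNat - 1 from by omega] at hb
            simp [cntSlots, hb]
            try omega
      · have hv' : (v == "1") = false := by simpa using hv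
        simp [cntSlots, hv', hv]
        try omega

theorem slotsF_fst (sp : Int) (dat : List String) : ∀ (xs : List Int) (qtd cont : Int),
    (slotsF sp dat xs qtd cont).map Prod.fst = xs := by
  intro xs
  induction xs with
  | nil => intro qtd cont; rfl
  | cons x xs ih =>
    intro qtd cont
    by_cases h : qtd < sp ∧ pyLog2Int x = true
    · simp [slotsF, if_pos h, ih]
    · simp [slotsF, if_neg h, ih]

-- ===== VERDICT (by name: the statement is the Claim_ definition above) =====
theorem receptor_converter_spec : Claim_equal_receptor_converter := by
  intro sp data hdom hpre
  unfold Spec_receptor_converter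
  simp only [receptor_converter, receptor_converter_alt]
  rw [pass1_eq sp data.toList 1 [] 0 [] [] (by omega)]
  set pr := rcB1 sp data.toList 1 0 [] [] with hprdef
  set dat := pr.2 with hdatdef
  set n : Int := sp + (dat.length : Int) with hn
  set xs := PySem.List.pyRange 1 (n + 1) 1 with hxs
  set sl := slotsF sp dat xs 0 0 with hsl
  rw [rcA2_eq_slots, List.nil_append]
  rw [rcB2_eq_foldSlots sp dat xs 0 0 _ (fun p hp => (PySem.List.mem_pyRange_one.mp hp).1)]
  rw [PySem.List.foldl_append_singleton_eq_map, List.nil_append]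
  have hfst : sl.map Prod.fst = xs := slotsF_fst sp dat xs 0 0
  have hpar : (PySem.List.pyRange 1 (sp + 1) 1).map (fun bp => PySem.Int.toStr
        (PySem.Int.mod (rcA3 (xs.map (fun x => String.ofList (binDigits x.toNat))) (sl.map Prod.snd) bp) 2))
      = (foldSlots sl (List.replicate (max sp 0).toNat 0)).map
        (fun a => PySem.Int.toStr (PySem.Int.mod a 2)) := by
    apply List.ext_getElem
    · rw [List.length_map, List.length_map, foldSlots_length, PySem.List.length_pyRange_one]
      simp
      omega
    · intro k hk1 hk2
      rw [List.getElem_map, List.getElem_map, PySem.List.getElem_pyRange_one]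
      have hA3 : rcA3 (xs.map (fun x => String.ofList (binDigits x.toNat))) (sl.map Prod.snd)
          (1 + (k : Int)) = cntSlots k sl := by
        unfold rcA3
        rw [rcA3_eq_cnt n (xs.map (fun x => String.ofList (binDigits x.toNat))) (by rw [hxs])
          (1 + (k : Int)) (by omega) sl 0 0 le_rfl (by rw [hfst, hxs]; norm_num)]
        rw [show ((1 + (k : Int)) - 1).toNat = k from by omega]
        ring
      rw [hA3]
      have hk2' : k < (foldSlots sl (List.replicate (max sp 0).toNat 0)).length := by
        rwa [List.length_map] at hk2
      have hrep : k < (List.replicate (max sp 0).toNat (0 : Int)).length := by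
        rw [← foldSlots_length sl]; exact hk2'
      rw [← List.getD_eq_getElem _ 0 hk2', foldSlots_getD sl _ k hrep,
        List.getD_eq_getElem _ _ hrep, List.getElem_replicate]
      norm_num
  rw [hpar]
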